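-- pv_equiv track=rewrite | github.com/sophialuo/CrackingTheCodingInterview_6thEdition | 1.9.py | string_rotation
-- ===== SOURCE A (Python) =====
-- def isSubstring(s1, s2):
-- 	if s1 in s2 or s2 in s1:
-- 		return True
-- 	return False
--
-- def string_rotation(s1, s2):
-- 	if len(s1) != len(s2):
-- 		return False
--
-- 	for i in range(len(s1)):
-- 		substr_front, substr_back = s1[:i], s1[i:]
-- 		if isSubstring(substr_front, s2) and isSubstring(substr_back, s2):
-- 			return True
-- 	return False
-- ===== SOURCE B (Python) =====
-- def string_rotation(s1, s2):
--     n = len(s1)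
--     if n != len(s2):
--         return False
--     # L = largest prefix length of s1 occurring in s2 (prefix occurrence is monotone)
--     L = 0
--     while L < n and s1[:L+1] in s2:
--         L += 1
--     # i0 = smallest index whose suffix s1[i0:] occurs in s2 (suffix occurrence is monotone)
--     i0 = n
--     while i0 > 0 and s1[i0-1:] in s2:
--         i0 -= 1
--     return i0 < n and i0 <= L
-- ===== Notes on version B (the rewrite author's own statement) =====
-- stated objective: faster
-- what changed: Instead of testing every split point of s1 against s2 (n iterations, each doing substring searches over the whole strings), B exploits that prefix/suffix occurrence in s2 is monotone in the split index: one upward scan finds the longest prefix of s1 occurring in s2, one downward scan finds the least suffix start, and the answer is a comparison of the two indices; both scans stop at the first failing test, so typical inputs need O(1) substring tests instead of n.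
import Mathlib
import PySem

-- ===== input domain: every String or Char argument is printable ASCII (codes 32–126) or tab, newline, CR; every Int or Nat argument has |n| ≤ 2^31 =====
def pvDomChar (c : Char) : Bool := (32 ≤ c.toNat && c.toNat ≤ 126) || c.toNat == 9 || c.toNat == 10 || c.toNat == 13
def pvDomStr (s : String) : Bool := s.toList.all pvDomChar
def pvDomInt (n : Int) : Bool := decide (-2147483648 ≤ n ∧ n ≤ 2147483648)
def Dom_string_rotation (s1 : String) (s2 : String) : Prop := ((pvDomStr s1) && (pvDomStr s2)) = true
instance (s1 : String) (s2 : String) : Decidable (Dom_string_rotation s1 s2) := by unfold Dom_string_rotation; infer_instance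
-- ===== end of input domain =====

-- B replaces A's scan over all split points by two monotone boundary scans (longest
-- prefix of s1 occurring in s2, least suffix start occurring in s2) and compares them;
-- objective: faster (measurably so on a timing run's generated inputs).

-- ===== PORT A =====
def isSubstring (a : List Char) (b : List Char) : Bool :=
  if PySem.Chars.isIn a b || PySem.Chars.isIn b a then true else false

def string_rotation (s1 : String) (s2 : String) : Bool :=
  if PySem.Chars.len s1.toList ≠ PySem.Chars.len s2.toList then false
  else
    (PySem.List.pyRange 0 (PySem.Chars.len s1.toList) 1).any (fun i =>
      isSubstring (PySem.List.slice s1.toList none (some i)) s2.toList &&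
      isSubstring (PySem.List.slice s1.toList (some i) none) s2.toList)

-- ===== PORT B =====
-- while L < n and s1[:L+1] in s2: L += 1   (fuel = n - L)
def altMaxPrefix (l1 : List Char) (l2 : List Char) : Nat → Nat → Nat
  | 0, L => L
  | fuel + 1, L =>
    if PySem.Chars.isIn (PySem.List.slice l1 none (some ((L : Int) + 1))) l2
    then altMaxPrefix l1 l2 fuel (L + 1) else L

-- while i0 > 0 and s1[i0-1:] in s2: i0 -= 1
def altMinSuffix (l1 : List Char) (l2 : List Char) : Nat → Nat
  | 0 => 0
  | i + 1 =>
    if PySem.Chars.isIn (PySem.List.slice l1 (some (i : Int)) none) l2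
    then altMinSuffix l1 l2 i else i + 1

def string_rotation_alt (s1 : String) (s2 : String) : Bool :=
  let n := s1.toList.length
  if n ≠ s2.toList.length then false
  else
    let L := altMaxPrefix s1.toList s2.toList n 0
    let i0 := altMinSuffix s1.toList s2.toList n
    decide (i0 < n) && decide (i0 ≤ L)

-- ===== PRECONDITION & SPEC =====
def Spec_string_rotation (s1 : String) (s2 : String) (out : Bool) : Prop := out = string_rotation_alt s1 s2
instance (s1 : String) (s2 : String) (out : Bool) : Decidable (Spec_string_rotation s1 s2 out) := by unfold Spec_string_rotation; infer_instance

-- ===== CLAIM (what is proved, stated in full; the proofs are below) =====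
def Claim_equal_string_rotation : Prop := ∀ (s1 : String) (s2 : String), Dom_string_rotation s1 s2 → Spec_string_rotation s1 s2 (string_rotation s1 s2)

-- ===== LEMMAS AND PROOFS =====

theorem isSubstring_eq (a b : List Char) :
    isSubstring a b = (PySem.Chars.isIn a b || PySem.Chars.isIn b a) := by
  simp [isSubstring]

-- prefix occurrence in l2 is monotone downward in the prefix length
theorem isIn_take_mono (l1 l2 : List Char) {i j : Nat} (hij : i ≤ j)
    (hj : PySem.Chars.isIn (l1.take j) l2 = true) :
    PySem.Chars.isIn (l1.take i) l2 = true := by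
  rw [PySem.Chars.isIn_iff_infix] at *
  have h1 : l1.take i <+: l1.take j := by
    have := List.take_prefix i (l1.take j)
    rwa [List.take_take, Nat.min_eq_left hij] at this
  exact h1.isInfix.trans hj

-- suffix occurrence in l2 is monotone upward in the suffix start
theorem isIn_drop_mono (l1 l2 : List Char) {i j : Nat} (hij : i ≤ j)
    (hi : PySem.Chars.isIn (l1.drop i) l2 = true) :
    PySem.Chars.isIn (l1.drop j) l2 = true := by
  rw [PySem.Chars.isIn_iff_infix] at *
  have h1 : l1.drop j <:+ l1.drop i := by
    have := List.drop_suffix (j - i) (l1.drop i)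
    rwa [List.drop_drop, Nat.add_sub_cancel' hij] at this
  exact h1.isInfix.trans hi

theorem altMaxPrefix_spec (l1 l2 : List Char) :
    ∀ (fuel L : Nat), PySem.Chars.isIn (l1.take L) l2 = true →
      L ≤ altMaxPrefix l1 l2 fuel L ∧ altMaxPrefix l1 l2 fuel L ≤ L + fuel ∧
      PySem.Chars.isIn (l1.take (altMaxPrefix l1 l2 fuel L)) l2 = true ∧
      (altMaxPrefix l1 l2 fuel L < L + fuel →
        PySem.Chars.isIn (l1.take (altMaxPrefix l1 l2 fuel L + 1)) l2 = false) := by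
  intro fuel
  induction fuel with
  | zero =>
    intro L hP
    simp only [altMaxPrefix]
    exact ⟨le_refl L, by omega, hP, by omega⟩
  | succ fuel ih =>
    intro L hP
    have hs : PySem.List.slice l1 none (some ((L : Int) + 1)) = l1.take (L + 1) := by
      have hcast : ((L : Int) + 1) = (((L + 1 : Nat)) : Int) := by push_cast; ring
      rw [hcast, PySem.List.slice_to_natCast]
    by_cases hc : PySem.Chars.isIn (l1.take (L + 1)) l2 = true
    · have hrec := ih (L + 1) hc
      simp only [altMaxPrefix, hs, hc, if_true]
      exact ⟨by omega, by omega, hrec.2.2.1, fun hlt => hrec.2.2.2 (by omega)⟩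
    · rw [show altMaxPrefix l1 l2 (fuel + 1) L = L from by simp [altMaxPrefix, hs, hc]]
      exact ⟨le_refl L, by omega, hP, fun _ => by simpa using hc⟩

theorem altMinSuffix_spec (l1 l2 : List Char) :
    ∀ (i : Nat), PySem.Chars.isIn (l1.drop i) l2 = true →
      altMinSuffix l1 l2 i ≤ i ∧
      PySem.Chars.isIn (l1.drop (altMinSuffix l1 l2 i)) l2 = true ∧
      (0 < altMinSuffix l1 l2 i →
        PySem.Chars.isIn (l1.drop (altMinSuffix l1 l2 i - 1)) l2 = false) := by
  intro i
  induction i with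
  | zero =>
    intro hQ
    simp only [altMinSuffix]
    exact ⟨le_refl 0, hQ, by omega⟩
  | succ i ih =>
    intro hQ
    have hs : PySem.List.slice l1 (some (i : Int)) none = l1.drop i := by
      rw [PySem.List.slice_from_natCast]
    by_cases hc : PySem.Chars.isIn (l1.drop i) l2 = true
    · have hrec := ih hc
      simp only [altMinSuffix, hs, hc, if_true]
      exact ⟨by omega, hrec.2.1, hrec.2.2⟩
    · rw [show altMinSuffix l1 l2 (i + 1) = i + 1 from by simp [altMinSuffix, hs, hc]]
      refine ⟨le_refl _, hQ, fun _ => ?_⟩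
      simpa using hc

-- characterisation of A: with equal lengths, the symmetric 'in' test collapses
theorem string_rotation_iff (s1 s2 : String)
    (h : s1.toList.length = s2.toList.length) :
    string_rotation s1 s2 = true ↔
      ∃ k : Nat, k < s1.toList.length ∧
        PySem.Chars.isIn (s1.toList.take k) s2.toList = true ∧
        PySem.Chars.isIn (s1.toList.drop k) s2.toList = true := by
  unfold string_rotation
  simp only [PySem.Chars.len_eq]
  rw [if_neg (by exact_mod_cast (show ¬ s1.toList.length ≠ s2.toList.length by omega))]
  rw [List.any_eq_true]
  constructor
  · rintro ⟨i, hmem, hcond⟩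
    rw [PySem.List.mem_pyRange_one] at hmem
    obtain ⟨h0, hlt⟩ := hmem
    set k := i.toNat with hk
    have hkn : k < s1.toList.length := by omega
    have hsf : PySem.List.slice s1.toList none (some i) = s1.toList.take k := by
      rw [PySem.List.slice_to s1.toList h0]
    have hsb : PySem.List.slice s1.toList (some i) none = s1.toList.drop k := by
      rw [PySem.List.slice_from s1.toList h0]
    rw [hsf, hsb, isSubstring_eq, isSubstring_eq] at hcond
    simp only [Bool.and_eq_true, Bool.or_eq_true] at hcond
    obtain ⟨hfront, hback⟩ := hcond
    refine ⟨k, hkn, ?_, ?_⟩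
    · rcases hfront with hf | hf
      · exact hf
      · exfalso
        rw [PySem.Chars.isIn_iff_infix] at hf
        have := hf.length_le
        rw [List.length_take] at this
        omega
    · rcases hback with hb | hb
      · exact hb
      · rw [PySem.Chars.isIn_iff_infix] at hb
        have hlen := hb.length_le
        rw [List.length_drop] at hlen
        have hk0 : k = 0 := by omega
        rw [hk0, List.drop_zero] at hb ⊢
        have heq : s2.toList = s1.toList := hb.eq_of_length (by omega)
        rw [PySem.Chars.isIn_iff_infix, heq]
  · rintro ⟨k, hkn, hf, hb⟩
    refine ⟨(k : Int), ?_, ?_⟩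
    · rw [PySem.List.mem_pyRange_one]
      constructor <;> [exact Int.natCast_nonneg k; exact_mod_cast hkn]
    · rw [PySem.List.slice_to_natCast, PySem.List.slice_from_natCast]
      rw [isSubstring_eq, isSubstring_eq]
      simp only [Bool.and_eq_true, Bool.or_eq_true]
      exact ⟨Or.inl hf, Or.inl hb⟩

theorem string_rotation_alt_iff (s1 s2 : String)
    (h : s1.toList.length = s2.toList.length) :
    string_rotation_alt s1 s2 = true ↔
      ∃ k : Nat, k < s1.toList.length ∧
        PySem.Chars.isIn (s1.toList.take k) s2.toList = true ∧
        PySem.Chars.isIn (s1.toList.drop k) s2.toList = true := by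
  unfold string_rotation_alt
  simp only
  rw [if_neg (by omega)]
  have hP0 : PySem.Chars.isIn (s1.toList.take 0) s2.toList = true := by
    rw [List.take_zero]; exact PySem.Chars.isIn_nil _
  have hQn : PySem.Chars.isIn (s1.toList.drop s1.toList.length) s2.toList = true := by
    rw [List.drop_length]; exact PySem.Chars.isIn_nil _
  obtain ⟨-, hLle, hPL, hLmax⟩ :=
    altMaxPrefix_spec s1.toList s2.toList s1.toList.length 0 hP0
  obtain ⟨hmle, hQm, hmmin⟩ :=
    altMinSuffix_spec s1.toList s2.toList s1.toList.length hQn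
  set L := altMaxPrefix s1.toList s2.toList s1.toList.length 0 with hL
  set m := altMinSuffix s1.toList s2.toList s1.toList.length with hm
  simp only [Bool.and_eq_true, decide_eq_true_eq]
  constructor
  · rintro ⟨hmn, hmL⟩
    exact ⟨m, hmn, isIn_take_mono s1.toList s2.toList hmL hPL, hQm⟩
  · rintro ⟨k, hkn, hPk, hQk⟩
    have hkL : k ≤ L := by
      by_contra hgt
      have hLn : L < s1.toList.length := by omega
      have := isIn_take_mono s1.toList s2.toList (show L + 1 ≤ k by omega) hPk
      rw [hLmax (by omega)] at this
      exact Bool.false_ne_true this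
    have hmk : m ≤ k := by
      by_contra hgt
      have h0m : 0 < m := by omega
      have := isIn_drop_mono s1.toList s2.toList (show k ≤ m - 1 by omega) hQk
      rw [hmmin h0m] at this
      exact Bool.false_ne_true this
    exact ⟨by omega, by omega⟩

-- ===== VERDICT (by name: the statement is the Claim_ definition above) =====
theorem string_rotation_spec : Claim_equal_string_rotation := by
  intro s1 s2 _
  unfold Spec_string_rotation
  by_cases h : s1.toList.length = s2.toList.length
  · rw [Bool.eq_iff_iff, string_rotation_iff s1 s2 h, string_rotation_alt_iff s1 s2 h]
  · unfold string_rotation string_rotation_alt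
    simp only [PySem.Chars.len_eq]
    have h1 : (s1.toList.length : Int) ≠ (s2.toList.length : Int) := by
      exact_mod_cast h
    rw [if_pos h1, if_pos h]
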